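-- pv_equiv track=rewrite | github.com/xX2Angelo8Xx/Turbulence-Solutions-Safe-Agent-Workspace | src/launcher/core/downloader.py | _select_asset
-- ===== SOURCE A (Python) =====
-- def _select_asset(
--     assets: list[dict],
--     extension: str,
--     arch: str,
-- ) -> dict:
--     """Select the best matching asset dict for the given extension and arch.
--
--     First tries to find an asset whose name contains an architecture keyword.
--     Falls back to the first asset whose name ends with *extension*.
--     Raises :class:`RuntimeError` if no suitable asset exists.
--     """
--     # Keywords that identify each architecture in typical installer filenames.
--     if arch == "x86_64":
--         arch_keywords: list[str] = ["x86_64", "amd64", "x64", "win64"]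
--     elif arch == "arm64":
--         arch_keywords = ["arm64", "aarch64"]
--     else:
--         arch_keywords = [arch]
--
--     # Pass 1: extension AND architecture keyword present in filename.
--     for asset in assets:
--         name: str = asset.get("name", "")
--         if name.endswith(extension):
--             lower_name = name.lower()
--             for kw in arch_keywords:
--                 if kw.lower() in lower_name:
--                     return asset
--
--     # Pass 2: extension only — accept any architecture.
--     for asset in assets:
--         name = asset.get("name", "")
--         if name.endswith(extension):
--             return asset
--
--     raise RuntimeError(
--         f"No asset found for extension={extension!r}, arch={arch!r}. "
--         f"Available assets: {[a.get('name') for a in assets]}"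
--     )
-- ===== SOURCE B (Python) =====
-- def _select_asset(
--     assets: list[dict],
--     extension: str,
--     arch: str,
-- ) -> dict:
--     """Single-pass selection: return immediately on an arch-keyword match,
--     remember the first extension-only match as a fallback."""
--     if arch == "x86_64":
--         arch_keywords = ["x86_64", "amd64", "x64", "win64"]
--     elif arch == "arm64":
--         arch_keywords = ["arm64", "aarch64"]
--     else:
--         arch_keywords = [arch]
--
--     fallback = None
--     for asset in assets:
--         name = asset.get("name", "")
--         if name.endswith(extension):
--             lower_name = name.lower()
--             if any(kw.lower() in lower_name for kw in arch_keywords):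
--                 return asset
--             if fallback is None:
--                 fallback = asset
--
--     if fallback is not None:
--         return fallback
--
--     raise RuntimeError(
--         f"No asset found for extension={extension!r}, arch={arch!r}. "
--         f"Available assets: {[a.get('name') for a in assets]}"
--     )
-- ===== Notes on version B (the rewrite author's own statement) =====
-- stated objective: alternative
-- what changed: Replaces A's two sequential scans over assets with a single pass that returns immediately on an arch-keyword match and keeps the first extension-only match in a fallback variable.
import Mathlib
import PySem

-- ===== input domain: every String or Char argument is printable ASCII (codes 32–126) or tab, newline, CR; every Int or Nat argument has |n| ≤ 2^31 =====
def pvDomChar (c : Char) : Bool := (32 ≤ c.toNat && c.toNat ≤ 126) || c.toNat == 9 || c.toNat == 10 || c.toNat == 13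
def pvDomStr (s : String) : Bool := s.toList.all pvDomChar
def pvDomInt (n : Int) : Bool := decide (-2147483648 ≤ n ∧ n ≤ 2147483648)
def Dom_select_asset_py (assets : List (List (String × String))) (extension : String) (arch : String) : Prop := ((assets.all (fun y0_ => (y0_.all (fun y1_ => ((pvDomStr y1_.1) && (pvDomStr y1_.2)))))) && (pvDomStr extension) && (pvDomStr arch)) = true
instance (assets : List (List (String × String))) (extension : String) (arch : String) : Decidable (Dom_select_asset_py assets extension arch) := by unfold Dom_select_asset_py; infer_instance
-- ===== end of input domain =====

-- B replaces A's two sequential scans with one pass carrying a first-match fallback; alternative decomposition, same cost.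


-- ===== PORT A =====
-- arch-keyword selection, shared verbatim by both Pythons
def pvKeywords (arch : String) : List String :=
  if arch = "x86_64" then ["x86_64", "amd64", "x64", "win64"]
  else if arch = "arm64" then ["arm64", "aarch64"]
  else [arch]

-- asset.get("name", "")
def pvName (asset : List (String × String)) : String :=
  PySem.Dict.getD (PySem.Dict.mk asset) "name" ""

-- Pass 1: first asset whose name ends with `extension` and whose lowered name contains a lowered keyword
def pvPass1 (kws : List String) (extension : String) : List (List (String × String)) → Option (List (String × String))
  | [] => none
  | asset :: rest =>
    let name := pvName asset
    if PySem.Str.endswith name extension then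
      let lowerName := PySem.Str.lower name
      if kws.any (fun kw => PySem.Str.isIn (PySem.Str.lower kw) lowerName) then some asset
      else pvPass1 kws extension rest
    else pvPass1 kws extension rest

-- Pass 2: first asset whose name ends with `extension`
def pvPass2 (extension : String) : List (List (String × String)) → Option (List (String × String))
  | [] => none
  | asset :: rest =>
    if PySem.Str.endswith (pvName asset) extension then some asset
    else pvPass2 extension rest

def select_asset_py (assets : List (List (String × String))) (extension : String) (arch : String) : List (String × String) :=
  match pvPass1 (pvKeywords arch) extension assets with
  | some asset => asset
  | none =>
    match pvPass2 extension assets with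
    | some asset => asset
    | none => []  -- Python raises RuntimeError here; excluded by Pre_

-- ===== PORT B =====
-- single pass: return on keyword match, else remember the first extension match as fallback
def pvScan (kws : List String) (extension : String) (fallback : Option (List (String × String))) : List (List (String × String)) → List (String × String)
  | [] => fallback.getD []  -- Python: return fallback, or raise RuntimeError (excluded by Pre_)
  | asset :: rest =>
    let name := pvName asset
    if PySem.Str.endswith name extension then
      let lowerName := PySem.Str.lower name
      if kws.any (fun kw => PySem.Str.isIn (PySem.Str.lower kw) lowerName) then asset
      else pvScan kws extension (if fallback.isNone then some asset else fallback) rest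
    else pvScan kws extension fallback rest

def select_asset_py_alt (assets : List (List (String × String))) (extension : String) (arch : String) : List (String × String) :=
  pvScan (pvKeywords arch) extension none assets

-- ===== PRECONDITION & SPEC =====
-- Pre_ excludes exactly the inputs where no asset name ends with `extension`: there both Pythons raise RuntimeError.
def Pre_select_asset_py (assets : List (List (String × String))) (extension : String) (arch : String) : Prop :=
  assets.any (fun asset => PySem.Str.endswith (pvName asset) extension) = true
instance (assets : List (List (String × String))) (extension : String) (arch : String) : Decidable (Pre_select_asset_py assets extension arch) := by unfold Pre_select_asset_py; infer_instance

def pvWitness_select_asset_py : (List (List (String × String))) × String × String :=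
  ([[("name", "tool-amd64.exe")], [("name", "tool.exe")]], ".exe", "x86_64")

def Spec_select_asset_py (assets : List (List (String × String))) (extension : String) (arch : String) (out : List (String × String)) : Prop := out = select_asset_py_alt assets extension arch
instance (assets : List (List (String × String))) (extension : String) (arch : String) (out : List (String × String)) : Decidable (Spec_select_asset_py assets extension arch out) := by unfold Spec_select_asset_py; infer_instance

-- ===== CLAIM (what is proved, stated in full; the proofs are below) =====
def Claim_equal_select_asset_py : Prop := ∀ (assets : List (List (String × String))) (extension : String) (arch : String), Dom_select_asset_py assets extension arch → Pre_select_asset_py assets extension arch → Spec_select_asset_py assets extension arch (select_asset_py assets extension arch)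

-- ===== LEMMAS AND PROOFS =====

-- The single pass equals: pass-1 result if any, else the carried fallback, else pass-2 of the remainder.
theorem pvScan_eq (kws : List String) (extension : String) :
    ∀ (assets : List (List (String × String))) (fallback : Option (List (String × String))),
      pvScan kws extension fallback assets =
        match pvPass1 kws extension assets with
        | some a => a
        | none =>
          match fallback with
          | some f => f
          | none => (pvPass2 extension assets).getD []
  | [], fallback => by cases fallback <;> simp [pvScan, pvPass1, pvPass2, Option.getD]
  | asset :: rest, fallback => by
    simp only [pvScan, pvPass1, pvPass2]
    by_cases he : PySem.Str.endswith (pvName asset) extension = true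
    · rw [if_pos he, if_pos he, if_pos he]
      by_cases hk : (kws.any fun kw => PySem.Str.isIn (PySem.Str.lower kw) (PySem.Str.lower (pvName asset))) = true
      · rw [if_pos hk, if_pos hk]
      · rw [if_neg hk, if_neg hk, pvScan_eq kws extension rest]
        rcases fallback with _ | f <;> cases pvPass1 kws extension rest <;> simp
    · rw [if_neg he, if_neg he, if_neg he]
      exact pvScan_eq kws extension rest fallback

-- ===== VERDICT (by name: the statement is the Claim_ definition above) =====
theorem select_asset_py_spec : Claim_equal_select_asset_py := by
  intro assets extension arch _ _
  unfold Spec_select_asset_py select_asset_py select_asset_py_alt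
  rw [pvScan_eq]
  cases pvPass1 (pvKeywords arch) extension assets <;>
    cases pvPass2 extension assets <;> simp [Option.getD]
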